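-- pv_equiv track=rewrite | github.com/Abzaek/Competitive-Programming | leetcode/break-a-palindrome.py | breakPalindrome
-- ===== SOURCE A (Python) =====
-- def breakPalindrome(palindrome: str) -> str:
--     '''
--
--     '''
--     ans = []
--     flag = False
--
--     for i, p in enumerate(palindrome):
--         if flag:
--             ans.append(p)
--         else:
--             if len(palindrome) % 2 and i == len(palindrome) // 2:
--                 ans.append(p)
--                 continue
--             elif p != 'a':
--                 flag = True
--             ans.append('a')
--
--     if ''.join(ans) == palindrome:
--         if len(ans) > 1:
--             ans[-1] = 'b'
--         else:
--             return ''
--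
--     return ''.join(ans)
-- ===== SOURCE B (Python) =====
-- def breakPalindrome(palindrome: str) -> str:
--     n = len(palindrome)
--     mid = n // 2 if n % 2 else -1
--     for i, c in enumerate(palindrome):
--         if c != 'a' and i != mid:
--             return palindrome[:i] + 'a' + palindrome[i + 1:]
--     return '' if n < 2 else palindrome[:-1] + 'b'
-- ===== Notes on version B (the rewrite author's own statement) =====
-- stated objective: faster
-- what changed: Replaces A's flag-driven full-pass list rebuild plus final comparison against the input with a direct search for the first replaceable position that returns a slice-spliced string immediately, and a closed-form fallback when no position qualifies.
import Mathlib
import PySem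

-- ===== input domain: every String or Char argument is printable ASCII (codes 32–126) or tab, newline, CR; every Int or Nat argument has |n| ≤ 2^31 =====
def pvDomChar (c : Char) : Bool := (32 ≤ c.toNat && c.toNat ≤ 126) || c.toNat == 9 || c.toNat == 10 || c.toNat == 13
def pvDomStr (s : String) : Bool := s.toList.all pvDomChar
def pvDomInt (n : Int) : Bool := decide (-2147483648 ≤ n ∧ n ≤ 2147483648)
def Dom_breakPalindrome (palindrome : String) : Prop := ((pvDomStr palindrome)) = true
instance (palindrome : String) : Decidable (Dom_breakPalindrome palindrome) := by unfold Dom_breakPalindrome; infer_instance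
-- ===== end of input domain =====

-- B replaces A's flag-driven full-pass rebuild (plus final comparison with the input) by a direct
-- search for the first replaceable position with immediate slice-splice return (constant-factor faster).

-- ===== PORT A =====
-- one loop iteration of A (n = len(palindrome); n ≥ 0 here, so Lean's Int % and / agree with Python's)
def bpStep (n : Int) (st : List Char × Bool) (ip : Int × Char) : List Char × Bool :=
  if st.2 then (st.1 ++ [ip.2], st.2)
  else if ¬ n % 2 = 0 ∧ ip.1 = n / 2 then (st.1 ++ [ip.2], st.2)
  else if ip.2 ≠ 'a' then (st.1 ++ ['a'], true)
  else (st.1 ++ ['a'], st.2)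

def breakPalindrome (palindrome : String) : String :=
  let l := palindrome.toList
  let n : Int := l.length
  let ans := (List.foldl (bpStep n) ([], false) (PySem.List.enumerate l 0)).1
  if String.ofList ans = palindrome then
    if 1 < ans.length then String.ofList (ans.dropLast ++ ['b']) else ""
  else String.ofList ans

-- ===== PORT B =====
-- the early-returning `for i, c in enumerate(...)` loop of Source B
def bpFind (mid : Int) : List Char → Nat → Option Nat
  | [], _ => none
  | c :: rest, i => if c ≠ 'a' ∧ (i : Int) ≠ mid then some i else bpFind mid rest (i + 1)

def breakPalindrome_alt (palindrome : String) : String :=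
  let l := palindrome.toList
  let n : Int := l.length
  let mid : Int := if ¬ n % 2 = 0 then n / 2 else -1
  -- slices with the nonnegative in-range index i are exactly take/drop
  match bpFind mid l 0 with
  | some i => String.ofList (l.take i ++ 'a' :: l.drop (i + 1))
  | none => if n < 2 then "" else String.ofList (l.dropLast ++ ['b'])  -- no replaceable char

-- ===== PRECONDITION & SPEC =====
def Spec_breakPalindrome (palindrome : String) (out : String) : Prop := out = breakPalindrome_alt palindrome
instance (palindrome : String) (out : String) : Decidable (Spec_breakPalindrome palindrome out) := by unfold Spec_breakPalindrome; infer_instance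

-- ===== CLAIM (what is proved, stated in full; the proofs are below) =====
def Claim_equal_breakPalindrome : Prop := ∀ (palindrome : String), Dom_breakPalindrome palindrome → Spec_breakPalindrome palindrome (breakPalindrome palindrome)

-- ===== LEMMAS AND PROOFS =====

lemma bpFind_ge (mid : Int) : ∀ (l : List Char) (k i : Nat), bpFind mid l k = some i → k ≤ i := by
  intro l
  induction l with
  | nil => intro k i h; simp [bpFind] at h
  | cons c rest ih =>
    intro k i h
    simp only [bpFind] at h
    split at h
    · cases h; omega
    · have := ih (k + 1) i h; omega
  
lemma bpFind_spec (mid : Int) : ∀ (l : List Char) (k i : Nat), bpFind mid l k = some i →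
    i - k < l.length ∧ ∃ c, l[i - k]? = some c ∧ c ≠ 'a' := by
  intro l
  induction l with
  | nil => intro k i h; simp [bpFind] at h
  | cons c rest ih =>
    intro k i h
    simp only [bpFind] at h
    split at h
    · cases h; simp
      next hc => exact hc.1
    · have hge := bpFind_ge mid rest (k + 1) i h
      obtain ⟨hlt, d, hd, hda⟩ := ih (k + 1) i h
      refine ⟨by simp; omega, d, ?_, hda⟩
      have : i - k = (i - (k + 1)) + 1 := by omega
      rw [this]
      simpa using hd

lemma foldA_true (n : Int) : ∀ (ps : List (Int × Char)) (acc : List Char),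
    List.foldl (bpStep n) (acc, true) ps = (acc ++ ps.map Prod.snd, true) := by
  intro ps
  induction ps with
  | nil => intro acc; simp
  | cons p rest ih =>
    intro acc
    simp [bpStep, ih]

lemma foldA (n mid : Int) (hm : ∀ k : Nat, ((¬ n % 2 = 0) ∧ (k : Int) = n / 2) ↔ (k : Int) = mid) :
    ∀ (l : List Char) (k : Nat) (acc : List Char),
      List.foldl (bpStep n) (acc, false) (PySem.List.enumerate l (k : Int)) =
        match bpFind mid l k with
        | none => (acc ++ l, false)
        | some i => (acc ++ l.take (i - k) ++ 'a' :: l.drop (i - k + 1), true) := by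
  intro l
  induction l with
  | nil => intro k acc; simp [PySem.List.enumerate_nil, bpFind]
  | cons c rest ih =>
    intro k acc
    rw [PySem.List.enumerate_cons]
    simp only [List.foldl_cons]
    by_cases hc : c ≠ 'a' ∧ (k : Int) ≠ mid
    · -- found: A sets the flag here
      have hstep : bpStep n (acc, false) ((k : Int), c) = (acc ++ ['a'], true) := by
        simp only [bpStep]
        rw [if_neg (by simp), if_neg (by rw [hm k]; exact hc.2), if_pos hc.1]
      rw [hstep]
      have : ((k : Int) + 1) = ((k + 1 : Nat) : Int) := by push_cast; ring
      rw [foldA_true, PySem.List.map_snd_enumerate]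
      simp only [bpFind, if_pos hc]
      simp
    · -- not found here: A keeps the character (it is 'a' or the middle), flag stays false
      have hstep : bpStep n (acc, false) ((k : Int), c) = (acc ++ [c], false) := by
        simp only [bpStep]
        rw [if_neg (by simp)]
        by_cases hmid : (k : Int) = mid
        · rw [if_pos (by rw [hm k]; exact hmid)]
        · have hca : c = 'a' := by
            by_contra hne
            exact hc ⟨hne, hmid⟩
          rw [if_neg (by rw [hm k]; exact hmid), if_neg (by simp [hca]), hca]
      rw [hstep]
      have hk1 : ((k : Int) + 1) = ((k + 1 : Nat) : Int) := by push_cast; ring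
      rw [hk1, ih (k + 1) (acc ++ [c])]
      simp only [bpFind, if_neg hc]
      cases hf : bpFind mid rest (k + 1) with
      | none => simp
      | some i =>
        have hge := bpFind_ge mid rest (k + 1) i hf
        have h1 : i - k = (i - (k + 1)) + 1 := by omega
        have h2 : i - k + 1 = (i - (k + 1) + 1) + 1 := by omega
        simp only [h1, List.take_succ_cons, List.drop_succ_cons]
        simp

-- ===== VERDICT (by name: the statement is the Claim_ definition above) =====
theorem breakPalindrome_spec : Claim_equal_breakPalindrome := by
  intro palindrome _
  unfold Spec_breakPalindrome breakPalindrome breakPalindrome_alt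
  set l := palindrome.toList with hl
  set n : Int := (l.length : Int) with hn
  set mid : Int := if ¬ n % 2 = 0 then n / 2 else -1 with hmid
  have hm : ∀ k : Nat, ((¬ n % 2 = 0) ∧ (k : Int) = n / 2) ↔ (k : Int) = mid := by
    intro k
    by_cases h2 : n % 2 = 0
    · constructor
      · intro h; exact absurd h2 h.1
      · intro h; rw [hmid] at h; simp [h2] at h
    · simp [hmid, h2]
  have h0 : (0 : Int) = ((0 : Nat) : Int) := by norm_num
  have hfold := foldA n mid hm l 0 []
  rw [h0]
  simp only []
  rw [hfold]
  cases hf : bpFind mid l 0 with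
  | none =>
    simp only [List.nil_append]
    rw [if_pos (by rw [hl]; exact String.ofList_toList)]
    by_cases hlen : 1 < l.length
    · rw [if_pos hlen, if_neg (by omega)]
    · rw [if_neg hlen, if_pos (by omega)]
  | some i =>
    obtain ⟨hlt, c, hc, hca⟩ := bpFind_spec mid l 0 i hf
    simp only [Nat.sub_zero] at hlt hc ⊢
    have hne : String.ofList (l.take i ++ 'a' :: l.drop (i + 1)) ≠ palindrome := by
      intro heq
      have : l.take i ++ 'a' :: l.drop (i + 1) = l := by
        have h2 := congrArg String.toList heq
        rw [String.toList_ofList] at h2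
        rw [h2, hl]
      have hgi : (l.take i ++ 'a' :: l.drop (i + 1))[i]? = some 'a' := by
        rw [List.getElem?_append_right (by simp)]
        simp [List.length_take, Nat.min_eq_left (Nat.le_of_lt hlt)]
      rw [this, hc] at hgi
      exact hca (Option.some.inj hgi)
    simp only [List.nil_append]
    rw [if_neg hne]
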